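-- pv_equiv track=rewrite | github.com/WolfgangFahl/pyFlaskBootstrap4 | fb4/app.py | splitPath
-- ===== SOURCE A (Python) =====
-- def splitPath(path:str):
--     '''
--     split the given path
--
--     Args:
--         path(str): the path to split
--     Returns:
--         str: the site of the path an the actual path
--     '''
--     # https://stackoverflow.com/questions/2136556/in-python-how-do-i-split-a-string-and-keep-the-separators
--     parts = path.split(r"/")
--     site = ""
--     if len(parts) > 0:
--         site = parts[0]
--     path = ""
--     if len(parts) > 1:
--         for part in parts[1:]:
--             path = path + "/%s" % (part)
--     return site, path
-- ===== SOURCE B (Python) =====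
-- def splitPath(path: str):
--     '''
--     split the given path
--
--     Args:
--         path(str): the path to split
--     Returns:
--         str: the site of the path an the actual path
--     '''
--     site, sep, tail = path.partition("/")
--     return site, sep + tail
-- ===== Notes on version B (the rewrite author's own statement) =====
-- stated objective: idiomatic
-- what changed: Instead of splitting the path into the full list of segments and re-joining the tail segments with a per-segment concatenation loop, B locates only the first '/' with str.partition and returns the two slices directly.
import Mathlib
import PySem

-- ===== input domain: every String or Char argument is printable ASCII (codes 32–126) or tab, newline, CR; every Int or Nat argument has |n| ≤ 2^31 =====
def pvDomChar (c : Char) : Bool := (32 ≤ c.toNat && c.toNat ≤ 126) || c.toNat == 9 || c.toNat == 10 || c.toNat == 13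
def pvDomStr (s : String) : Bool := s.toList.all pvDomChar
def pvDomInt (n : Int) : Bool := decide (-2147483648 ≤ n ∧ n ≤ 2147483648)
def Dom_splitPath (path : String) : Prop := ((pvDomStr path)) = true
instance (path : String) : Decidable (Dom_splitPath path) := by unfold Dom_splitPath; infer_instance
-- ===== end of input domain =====

-- B replaces A's full split-into-all-segments + rejoin loop by a single first-'/' boundary split (str.partition); same values, more idiomatic.

-- ===== PORT A =====
def splitPath (path : String) : String × String :=
  -- parts = path.split("/")
  let parts : List (List Char) := PySem.Chars.splitOn path.toList ['/']
  -- site = "" ; if len(parts) > 0: site = parts[0]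
  let site : List Char := if parts.length > 0 then parts.getD 0 [] else []
  -- path = "" ; if len(parts) > 1: for part in parts[1:]: path = path + "/%s" % (part)
  let p : List Char :=
    if parts.length > 1 then
      (PySem.List.slice parts (some 1) none).foldl (fun acc part => acc ++ '/' :: part) []
    else []
  (String.ofList site, String.ofList p)

-- ===== PORT B =====
-- site, sep, tail = path.partition("/"); return site, sep + tail
-- (exact for the single-char separator '/': site = everything before the first '/',
--  sep + tail = everything from the first '/' on, empty when the path contains no '/')
def splitPath_alt (path : String) : String × String :=
  let cs : List Char := path.toList
  (String.ofList (cs.takeWhile (· ≠ '/')), String.ofList (cs.dropWhile (· ≠ '/')))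

-- ===== PRECONDITION & SPEC =====
def Spec_splitPath (path : String) (out : String × String) : Prop := out = splitPath_alt path
instance (path : String) (out : String × String) : Decidable (Spec_splitPath path out) := by unfold Spec_splitPath; infer_instance

-- ===== CLAIM (what is proved, stated in full; the proofs are below) =====
def Claim_equal_splitPath : Prop := ∀ (path : String), Dom_splitPath path → Spec_splitPath path (splitPath path)

-- ===== LEMMAS AND PROOFS =====

-- PySem's fuel-based Chars.splitOn on the one-char separator '/' is Mathlib's splitOnP.
theorem pv_go_eq (fuel : Nat) (l cur : List Char) (acc : List (List Char)) (h : l.length < fuel) :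
    PySem.Chars.splitOn.go ['/'] fuel l cur acc
      = acc.reverse ++ List.modifyHead (cur.reverse ++ ·) (List.splitOnP (· == '/') l) := by
  induction fuel generalizing l cur acc with
  | zero => omega
  | succ n ih =>
    cases l with
    | nil => simp [PySem.Chars.splitOn.go]
    | cons c rest =>
      have hstep : PySem.Chars.splitOn.go ['/'] (n+1) (c :: rest) cur acc
          = if ['/'].isPrefixOf (c :: rest)
            then PySem.Chars.splitOn.go ['/'] n (List.drop 1 (c :: rest)) [] (cur.reverse :: acc)
            else PySem.Chars.splitOn.go ['/'] n rest (c :: cur) acc := rfl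
      rw [hstep]
      have hlt : rest.length < n := by simpa using Nat.lt_of_succ_lt_succ h
      by_cases hc : c = '/'
      · subst hc
        rw [if_pos (by simp [List.isPrefixOf])]
        rw [List.drop_one, List.tail_cons, ih rest [] (cur.reverse :: acc) hlt,
          List.splitOnP_cons]
        cases List.splitOnP (· == '/') rest <;> simp
      · rw [if_neg (by simp [List.isPrefixOf]; exact fun hh => hc (by simpa using hh.symm))]
        rw [ih rest (c :: cur) acc hlt, List.splitOnP_cons]
        have : ((c : Char) == '/') = false := by simpa using hc
        rw [this]
        simp only [if_neg Bool.false_ne_true]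
        cases List.splitOnP (· == '/') rest <;> simp

theorem pv_splitOn_eq (cs : List Char) :
    PySem.Chars.splitOn cs ['/'] = List.splitOnP (· == '/') cs := by
  have := pv_go_eq (cs.length + 1) cs [] [] (by omega)
  rw [PySem.Chars.splitOn, this]
  cases List.splitOnP (· == '/') cs <;> simp

-- every piece of the split, prefixed by '/', re-joins to '/' :: cs
theorem pv_flatMap_splitOnP (cs : List Char) :
    (List.splitOnP (· == '/') cs).flatMap (fun p => '/' :: p) = '/' :: cs := by
  induction cs with
  | nil => simp [List.splitOnP_nil]
  | cons c cs ih =>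
    rw [List.splitOnP_cons]
    by_cases hc : c = '/'
    · simp [hc, ih]
    · rcases hP : List.splitOnP (· == '/') cs with _ | ⟨p, ps⟩
      · exact absurd hP (List.splitOnP_ne_nil _ _)
      · rw [hP] at ih
        have : ((c : Char) == '/') = false := by simpa using hc
        rw [this]
        simp only [if_neg Bool.false_ne_true, List.modifyHead_cons, List.flatMap_cons,
          List.cons_append] at ih ⊢
        injection ih with _ h'
        simp [h']

-- head piece = takeWhile (≠ '/'), '/'-joined tail pieces = dropWhile (≠ '/')
theorem pv_split_head_tail (cs : List Char) :
    (List.splitOnP (· == '/') cs).headD [] = cs.takeWhile (· ≠ '/')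
    ∧ (List.splitOnP (· == '/') cs).tail.flatMap (fun p => '/' :: p) = cs.dropWhile (· ≠ '/') := by
  induction cs with
  | nil => simp [List.splitOnP_nil]
  | cons c cs ih =>
    rw [List.splitOnP_cons]
    by_cases hc : c = '/'
    · subst hc
      simp [pv_flatMap_splitOnP]
    · rcases hP : List.splitOnP (· == '/') cs with _ | ⟨p, ps⟩
      · exact absurd hP (List.splitOnP_ne_nil _ _)
      · rw [hP] at ih
        have hb : ((c : Char) == '/') = false := by simpa using hc
        rw [hb]
        simp only [if_neg Bool.false_ne_true, List.modifyHead_cons, List.headD_cons,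
          List.tail_cons, List.takeWhile_cons, List.dropWhile_cons] at ih ⊢
        simp [hc, ih.1, ih.2]

-- ===== VERDICT (by name: the statement is the Claim_ definition above) =====
theorem splitPath_spec : Claim_equal_splitPath := by
  intro path _
  unfold Spec_splitPath splitPath splitPath_alt
  rw [pv_splitOn_eq]
  obtain ⟨h1, h2⟩ := pv_split_head_tail path.toList
  rcases hP : List.splitOnP (· == '/') path.toList with _ | ⟨p, ps⟩
  · exact absurd hP (List.splitOnP_ne_nil _ _)
  · rw [hP] at h1 h2
    simp only [List.headD_cons] at h1
    simp only [List.tail_cons] at h2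
    rcases ps with _ | ⟨q, qs⟩
    · simp only [List.flatMap_nil] at h2
      simp only [ne_eq, decide_not] at h1 h2 ⊢
      simp [h1, ← h2]
    · simp only [List.length_cons, PySem.List.slice_from_one, List.tail_cons]
      rw [if_pos (by simp), if_pos (by omega),
        PySem.List.foldl_append_eq_flatMap (fun part => '/' :: part) (q :: qs) []]
      simp only [List.flatMap_cons, List.cons_append] at h2
      simp only [ne_eq, decide_not] at h1 h2 ⊢
      simp [h1, ← h2]
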